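-- pv_equiv track=rewrite | github.com/dictionaria/kalamang | cldfbench_kalamang.py | merge_mn
-- ===== SOURCE A (Python) =====
-- def merge_mn(entry):
--     mns = []
--     for marker, value in entry:
--         if marker == 'mn':
--             mns.append(value)
--         elif mns:
--             yield 'mn', ' ; '.join(mns)
--             yield marker, value
--             mns = []
--         else:
--             yield marker, value
--     if mns:
--         yield 'mn', ' ; '.join(mns)
-- ===== SOURCE B (Python) =====
-- from itertools import groupby
--
-- def merge_mn(entry):
--     for is_mn, group in groupby(entry, key=lambda mv: mv[0] == 'mn'):
--         if is_mn:
--             yield 'mn', ' ; '.join(value for _, value in group)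
--         else:
--             yield from group
-- ===== Notes on version B (the rewrite author's own statement) =====
-- stated objective: idiomatic
-- what changed: Replaced the manual accumulator-and-flush buffer with itertools.groupby over consecutive runs keyed by marker == 'mn', joining each mn-run and emitting other runs unchanged.
import Mathlib
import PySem

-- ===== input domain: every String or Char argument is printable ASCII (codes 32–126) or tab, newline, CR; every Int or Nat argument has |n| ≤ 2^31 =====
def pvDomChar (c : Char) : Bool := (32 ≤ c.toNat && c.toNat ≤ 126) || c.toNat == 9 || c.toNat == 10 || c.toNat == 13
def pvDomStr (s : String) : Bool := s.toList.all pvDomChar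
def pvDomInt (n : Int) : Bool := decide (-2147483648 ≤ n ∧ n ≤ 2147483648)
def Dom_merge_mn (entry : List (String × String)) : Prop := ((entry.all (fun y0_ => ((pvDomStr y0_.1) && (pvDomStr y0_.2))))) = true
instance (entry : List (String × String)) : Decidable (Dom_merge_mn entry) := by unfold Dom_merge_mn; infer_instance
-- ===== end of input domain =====

-- B replaces A's manual accumulate-and-flush buffer with group-consecutive-runs-then-emit (itertools.groupby); same cost, more idiomatic. Equivalence is about the yielded sequence (both are generators; neither mutates its argument).

-- ===== PORT A =====
-- the loop of A: state is the pending buffer `mns` of mn-values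
def mergeMnAux : List (String × String) → List String → List (String × String)
  | [], mns => if mns ≠ [] then [("mn", PySem.Str.join " ; " mns)] else []
  | (marker, value) :: rest, mns =>
    if marker = "mn" then mergeMnAux rest (mns ++ [value])
    else if mns ≠ [] then
      ("mn", PySem.Str.join " ; " mns) :: (marker, value) :: mergeMnAux rest []
    else (marker, value) :: mergeMnAux rest []

def merge_mn (entry : List (String × String)) : List (String × String) :=
  mergeMnAux entry []

-- ===== PORT B =====
-- itertools.groupby with key mv[0] == 'mn': consecutive runs tagged with their key
def mergeMnGroups : List (String × String) → List (Bool × List (String × String))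
  | [] => []
  | p :: rest =>
    let k := p.1 == "mn"
    (k, p :: rest.takeWhile (fun q => (q.1 == "mn") == k)) ::
      mergeMnGroups (rest.dropWhile (fun q => (q.1 == "mn") == k))
termination_by l => l.length
decreasing_by
  simp only [List.length_cons]
  exact Nat.lt_succ_of_le (List.length_dropWhile_le _ _)

def merge_mn_alt (entry : List (String × String)) : List (String × String) :=
  (mergeMnGroups entry).flatMap fun g =>
    if g.1 then [("mn", PySem.Str.join " ; " (g.2.map Prod.snd))] else g.2

-- ===== PRECONDITION & SPEC =====
def Spec_merge_mn (entry : List (String × String)) (out : List (String × String)) : Prop := out = merge_mn_alt entry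
instance (entry : List (String × String)) (out : List (String × String)) : Decidable (Spec_merge_mn entry out) := by unfold Spec_merge_mn; infer_instance

-- ===== CLAIM (what is proved, stated in full; the proofs are below) =====
def Claim_equal_merge_mn : Prop := ∀ (entry : List (String × String)), Dom_merge_mn entry → Spec_merge_mn entry (merge_mn entry)

-- ===== LEMMAS AND PROOFS =====

lemma groups_nil : mergeMnGroups [] = [] := by rw [mergeMnGroups.eq_def]

lemma groups_cons (p : String × String) (rest : List (String × String)) :
    mergeMnGroups (p :: rest)
      = ((p.1 == "mn"), p :: rest.takeWhile (fun q => (q.1 == "mn") == (p.1 == "mn")))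
          :: mergeMnGroups (rest.dropWhile (fun q => (q.1 == "mn") == (p.1 == "mn"))) := by
  rw [mergeMnGroups.eq_def]

-- a non-mn head passes straight through B
lemma alt_cons_nonmn (m v : String) (rest : List (String × String)) (hm : ¬ m = "mn") :
    merge_mn_alt ((m, v) :: rest) = (m, v) :: merge_mn_alt rest := by
  cases rest with
  | nil => simp [merge_mn_alt, groups_cons, groups_nil, hm]
  | cons q r2 =>
    by_cases hq : q.1 = "mn"
    · rw [merge_mn_alt, groups_cons]
      simp [hm, hq, merge_mn_alt]
    · have h1 : (m == "mn") = false := by simp [hm]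
      have h2 : (q.1 == "mn") = false := by simp [hq]
      rw [merge_mn_alt, groups_cons]
      conv_rhs => rw [merge_mn_alt, groups_cons]
      simp [h1, h2]

-- a nonempty block of mn pairs before a non-mn pair is emitted as one joined pair
lemma alt_mn_block (vs : List String) (m v : String) (rest : List (String × String))
    (hvs : vs ≠ []) (hm : ¬ m = "mn") :
    merge_mn_alt (vs.map (fun w => ("mn", w)) ++ (m, v) :: rest)
      = ("mn", PySem.Str.join " ; " vs) :: merge_mn_alt ((m, v) :: rest) := by
  obtain ⟨w, ws, rfl⟩ := List.exists_cons_of_ne_nil hvs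
  rw [merge_mn_alt, List.map_cons, List.cons_append, groups_cons]
  have htake : ∀ (ws : List String),
      (ws.map (fun w => (("mn" : String), w)) ++ (m, v) :: rest).takeWhile
        (fun q => (q.1 == "mn") == ((("mn" : String), w).1 == "mn"))
      = ws.map (fun w => (("mn" : String), w)) := by
    intro ws
    induction ws with
    | nil => simp [hm]
    | cons a t ih => simp [hm]
  have hdrop : ∀ (ws : List String),
      (ws.map (fun w => (("mn" : String), w)) ++ (m, v) :: rest).dropWhile
        (fun q => (q.1 == "mn") == ((("mn" : String), w).1 == "mn"))
      = (m, v) :: rest := by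
    intro ws
    induction ws with
    | nil => simp [hm]
    | cons a t ih => simp [hm]
  rw [htake, hdrop]
  simp [merge_mn_alt]

-- the trailing mn block
lemma alt_mn_tail (vs : List String) (hvs : vs ≠ []) :
    merge_mn_alt (vs.map (fun w => ("mn", w)))
      = [("mn", PySem.Str.join " ; " vs)] := by
  obtain ⟨w, ws, rfl⟩ := List.exists_cons_of_ne_nil hvs
  rw [merge_mn_alt, List.map_cons, groups_cons]
  have htake : ∀ (ws : List String),
      (ws.map (fun w => (("mn" : String), w))).takeWhile
        (fun q => (q.1 == "mn") == ((("mn" : String), w).1 == "mn"))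
      = ws.map (fun w => (("mn" : String), w)) := by
    intro ws
    induction ws with
    | nil => simp
    | cons a t ih => simp
  have hdrop : ∀ (ws : List String),
      (ws.map (fun w => (("mn" : String), w))).dropWhile
        (fun q => (q.1 == "mn") == ((("mn" : String), w).1 == "mn"))
      = [] := by
    intro ws
    induction ws with
    | nil => simp
    | cons a t ih => simp
  rw [htake, hdrop]
  simp [groups_nil]

-- main invariant: A's aux with buffer vs equals B on the buffer (as mn pairs) prepended
lemma aux_eq_alt (entry : List (String × String)) :
    ∀ vs : List String,
      mergeMnAux entry vs = merge_mn_alt (vs.map (fun w => ("mn", w)) ++ entry) := by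
  induction entry with
  | nil =>
    intro vs
    cases hvs : vs with
    | nil => simp [mergeMnAux, merge_mn_alt, groups_nil]
    | cons w ws =>
      rw [mergeMnAux, if_pos (by simp : (w :: ws) ≠ []), List.append_nil,
        alt_mn_tail _ (by simp)]
  | cons p rest ih =>
    intro vs
    obtain ⟨m, v⟩ := p
    by_cases hm : m = "mn"
    · subst hm
      rw [mergeMnAux, if_pos rfl, ih (vs ++ [v])]
      congr 1
      simp
    · by_cases hvs : vs = []
      · subst hvs
        rw [mergeMnAux, if_neg hm, if_neg (by simp : ¬ ([] : List String) ≠ [])]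
        rw [List.map_nil, List.nil_append, alt_cons_nonmn _ _ _ hm, ih []]
        simp
      · rw [mergeMnAux, if_neg hm, if_pos hvs]
        rw [alt_mn_block vs m v rest hvs hm, alt_cons_nonmn _ _ _ hm, ih []]
        simp

-- ===== VERDICT (by name: the statement is the Claim_ definition above) =====
theorem merge_mn_spec : Claim_equal_merge_mn := by
  intro entry _
  unfold Spec_merge_mn merge_mn
  simpa using aux_eq_alt entry []
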